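-- pv_equiv track=rewrite | github.com/HsuanChi1204/Leetcode | Arrays_and_Hashing/Find_the_Duplicate_Number/solution.py | findDuplicate_floyd
-- ===== SOURCE A (Python) =====
-- from typing import List
--
-- def findDuplicate_floyd(nums: List[int]) -> int:
--     """
--     Solution 1: Floyd's Cycle Detection (Tortoise and Hare)
--     Time Complexity: O(n)
--     Space Complexity: O(1)
--     """
--     # Phase 1: Find the intersection point
--     slow = fast = nums[0]
--     while True:
--         slow = nums[slow]
--         fast = nums[nums[fast]]
--         if slow == fast:
--             break
--
--     # Phase 2: Find the entrance to the cycle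
--     slow = nums[0]
--     while slow != fast:
--         slow = nums[slow]
--         fast = nums[fast]
--
--     return slow
-- ===== SOURCE B (Python) =====
-- from typing import List
--
-- def findDuplicate_floyd(nums: List[int]) -> int:
--     # Single walk from nums[0] with a seen-set: the first node visited twice
--     # is the entrance of the cycle, i.e. the duplicate on valid inputs.
--     seen = set()
--     x = nums[0]
--     while x not in seen:
--         seen.add(x)
--         x = nums[x]
--     return x
-- ===== Notes on version B (the rewrite author's own statement) =====
-- stated objective: simpler
-- what changed: Replaces Floyd's two-phase tortoise-and-hare cycle detection with a single walk that records visited nodes in a seen-set and returns the first node reached twice (the cycle entrance).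
-- outside the precondition, e.g. on findDuplicate_floyd([0, 99]): A returns 0, B returns 0; on findDuplicate_floyd([]): A raises IndexError, B raises IndexError
import Mathlib
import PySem

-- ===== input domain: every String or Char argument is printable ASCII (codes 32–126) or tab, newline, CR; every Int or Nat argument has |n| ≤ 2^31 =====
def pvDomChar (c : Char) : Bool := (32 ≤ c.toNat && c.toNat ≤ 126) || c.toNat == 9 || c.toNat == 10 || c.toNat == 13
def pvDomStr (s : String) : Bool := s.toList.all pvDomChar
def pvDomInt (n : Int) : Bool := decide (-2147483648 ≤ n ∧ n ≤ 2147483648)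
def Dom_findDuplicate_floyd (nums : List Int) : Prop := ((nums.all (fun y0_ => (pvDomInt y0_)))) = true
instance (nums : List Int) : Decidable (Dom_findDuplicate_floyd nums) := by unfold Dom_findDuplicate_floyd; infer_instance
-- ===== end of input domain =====

-- B replaces Floyd's two-phase tortoise-and-hare cycle detection with a single walk that records
-- visited nodes in a set and returns the first node reached twice; both return the entrance of the
-- cycle of the walk (the duplicate, on the problem's intended inputs).

-- ===== PORT A =====
-- Phase 1 while-loop of A; the fuel bounds the iteration count (proved sufficient on Pre_ inputs);
-- `none` = IndexError (out-of-range lookup) or fuel exhausted, both only outside Pre_.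
def pvPhase1 (nums : List Int) : Nat → Int → Int → Option Int
  | 0, _, _ => none
  | fuel+1, slow, fast =>
    match PySem.List.pyGet? nums slow,
          (PySem.List.pyGet? nums fast).bind (fun t => PySem.List.pyGet? nums t) with
    | some slow', some fast' =>
        if slow' = fast' then some slow' else pvPhase1 nums fuel slow' fast'
    | _, _ => none

-- Phase 2 while-loop of A.
def pvPhase2 (nums : List Int) : Nat → Int → Int → Option Int
  | 0, _, _ => none
  | fuel+1, slow, fast =>
    if slow = fast then some slow
    else
      match PySem.List.pyGet? nums slow, PySem.List.pyGet? nums fast with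
      | some slow', some fast' => pvPhase2 nums fuel slow' fast'
      | _, _ => none

-- On inputs where Python raises IndexError (only outside Pre_) the port returns 0.
def findDuplicate_floyd (nums : List Int) : Int :=
  (match PySem.List.pyGet? nums 0 with
   | none => none
   | some x0 =>
     match pvPhase1 nums (4 * nums.length * nums.length + 2) x0 x0 with
     | none => none
     | some meet => pvPhase2 nums (4 * nums.length * nums.length + 2) x0 meet).getD 0

-- ===== PORT B =====
-- the `while x not in seen` loop of B; fuel as above (proved sufficient on Pre_ inputs)
def pvWalk (nums : List Int) : Nat → PySem.Set Int → Int → Option Int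
  | 0, _, _ => none
  | fuel+1, seen, x =>
    if PySem.Set.contains seen x then some x
    else
      match PySem.List.pyGet? nums x with
      | none => none
      | some y => pvWalk nums fuel (PySem.Set.add seen x) y

def findDuplicate_floyd_alt (nums : List Int) : Int :=
  (match PySem.List.pyGet? nums 0 with
   | none => none
   | some x0 => pvWalk nums (2 * nums.length + 2) PySem.Set.empty x0).getD 0

-- ===== PRECONDITION & SPEC =====
-- Pre_ restricts to nonempty lists whose values are all valid indices (in [-len, len), Python
-- semantics); outside it A raises IndexError as soon as the pointer walk reaches an out-of-range
-- value (on excluded inputs whose walk never reaches one, A returns and B agrees, e.g. [0, 99]).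
def Pre_findDuplicate_floyd (nums : List Int) : Prop :=
  1 ≤ nums.length ∧ ∀ x ∈ nums, -(nums.length : Int) ≤ x ∧ x < (nums.length : Int)

instance (nums : List Int) : Decidable (Pre_findDuplicate_floyd nums) := by
  unfold Pre_findDuplicate_floyd; infer_instance

def pvWitness_findDuplicate_floyd : List Int := [1, 3, 4, 2, 2]

def Spec_findDuplicate_floyd (nums : List Int) (out : Int) : Prop := out = findDuplicate_floyd_alt nums
instance (nums : List Int) (out : Int) : Decidable (Spec_findDuplicate_floyd nums out) := by
  unfold Spec_findDuplicate_floyd; infer_instance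

-- ===== CLAIM (what is proved, stated in full; the proofs are below) =====
def Claim_equal_findDuplicate_floyd : Prop := ∀ (nums : List Int), Dom_findDuplicate_floyd nums → Pre_findDuplicate_floyd nums → Spec_findDuplicate_floyd nums (findDuplicate_floyd nums)

-- ===== LEMMAS AND PROOFS =====

-- the total lookup function underlying the pointer walk (agrees with nums[i] on in-range i)
def pvG (nums : List Int) (i : Int) : Int := (PySem.List.pyGet? nums i).getD 0

-- the orbit of nums[0] under pvG, shared by both ports
def pvSeq (nums : List Int) : Nat → Int
  | 0 => pvG nums 0
  | k+1 => pvG nums (pvSeq nums k)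

theorem pvG_spec {nums : List Int} {i : Int} (h0 : -(nums.length : Int) ≤ i) (h1 : i < (nums.length : Int)) :
    PySem.List.pyGet? nums i = some (pvG nums i) ∧ pvG nums i ∈ nums := by
  cases hopt : PySem.List.pyGet? nums i with
  | none =>
      rw [PySem.List.pyGet?_eq_none_iff] at hopt
      exact absurd ⟨h0, h1⟩ hopt
  | some y =>
      have hg : pvG nums i = y := by unfold pvG; rw [hopt]; rfl
      refine ⟨by rw [hg], ?_⟩
      rw [hg]
      exact PySem.List.mem_of_pyGet?_eq_some _ hopt

theorem pvSeq_mem {nums : List Int} (h1 : 1 ≤ nums.length)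
    (hb : ∀ x ∈ nums, -(nums.length : Int) ≤ x ∧ x < (nums.length : Int)) :
    ∀ k, pvSeq nums k ∈ nums := by
  intro k
  induction k with
  | zero => exact (pvG_spec (by omega) (by exact_mod_cast by omega)).2
  | succ k ih =>
      have hbk := hb _ ih
      exact (pvG_spec (i := pvSeq nums k) (by omega) (by omega)).2

theorem pvSeq_bounds {nums : List Int} (h1 : 1 ≤ nums.length)
    (hb : ∀ x ∈ nums, -(nums.length : Int) ≤ x ∧ x < (nums.length : Int)) (k : Nat) :
    -(nums.length : Int) ≤ pvSeq nums k ∧ pvSeq nums k < (nums.length : Int) :=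
  hb _ (pvSeq_mem h1 hb k)

theorem pvSeq_lookup {nums : List Int} (h1 : 1 ≤ nums.length)
    (hb : ∀ x ∈ nums, -(nums.length : Int) ≤ x ∧ x < (nums.length : Int)) (k : Nat) :
    PySem.List.pyGet? nums (pvSeq nums k) = some (pvSeq nums (k+1)) := by
  have hbk := pvSeq_bounds h1 hb k
  exact (pvG_spec (by omega) (by omega)).1

theorem pvSeq_shift {nums : List Int} {a b : Nat} (h : pvSeq nums a = pvSeq nums b) (t : Nat) :
    pvSeq nums (a + t) = pvSeq nums (b + t) := by
  induction t with
  | zero => simpa using h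
  | succ t ih => show pvG nums (pvSeq nums (a + t)) = pvG nums (pvSeq nums (b + t)); rw [ih]

theorem pvSeq_repeat {nums : List Int} (h1 : 1 ≤ nums.length)
    (hb : ∀ x ∈ nums, -(nums.length : Int) ≤ x ∧ x < (nums.length : Int)) :
    ∃ i j : Nat, i < j ∧ j ≤ 2 * nums.length ∧ pvSeq nums i = pvSeq nums j := by
  have hcard : (Finset.Icc (-(nums.length : Int)) ((nums.length : Int) - 1)).card
      < (Finset.range (2 * nums.length + 1)).card := by
    rw [Int.card_Icc, Finset.card_range]
    omega
  have hmaps : Set.MapsTo (fun k => pvSeq nums k) ↑(Finset.range (2 * nums.length + 1))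
      ↑(Finset.Icc (-(nums.length : Int)) ((nums.length : Int) - 1)) := by
    intro k _
    have := pvSeq_bounds h1 hb k
    simp only [Finset.coe_Icc, Set.mem_Icc]
    omega
  obtain ⟨x, hxm, y, hym, hxy, hf⟩ := Finset.exists_ne_map_eq_of_card_lt_of_maps_to hcard hmaps
  have hx : x < 2 * nums.length + 1 := by simpa using hxm
  have hy : y < 2 * nums.length + 1 := by simpa using hym
  rcases lt_trichotomy x y with h | h | h
  · exact ⟨x, y, h, by omega, hf⟩
  · exact absurd h hxy
  · exact ⟨y, x, h, by omega, hf.symm⟩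

-- a period lam starting at a propagates to all later indices

theorem pvPer1 {nums : List Int} {a lam : Nat} (hlam : pvSeq nums (a + lam) = pvSeq nums a) :
    ∀ m, a ≤ m → pvSeq nums (m + lam) = pvSeq nums m := by
  intro m hm
  have := pvSeq_shift hlam (m - a)
  have e1 : a + lam + (m - a) = m + lam := by omega
  have e2 : a + (m - a) = m := by omega
  rw [e1, e2] at this
  exact this

theorem pvMulti {nums : List Int} {a lam : Nat} (hlam : pvSeq nums (a + lam) = pvSeq nums a) :
    ∀ c m, a ≤ m → pvSeq nums (m + c * lam) = pvSeq nums m := by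
  intro c
  induction c with
  | zero => intro m _; simp
  | succ c ih =>
      intro m hm
      have e : m + (c+1) * lam = (m + c * lam) + lam := by ring
      rw [e, pvPer1 hlam _ (by omega), ih m hm]

-- no period shorter than the minimal one, anywhere at or beyond μ

theorem pvNoSmallPeriod {nums : List Int} {μ lam : Nat}
    (hlam : pvSeq nums (μ + lam) = pvSeq nums μ) (hlam0 : 0 < lam)
    (hlammin : ∀ p, 0 < p → pvSeq nums (μ + p) = pvSeq nums μ → lam ≤ p) :
    ∀ m r, μ ≤ m → 0 < r → r < lam → pvSeq nums (m + r) = pvSeq nums m → False := by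
  intro m r hm hr0 hrl hper
  have hE : pvSeq nums (μ + (m - μ) % lam) = pvSeq nums m := by
    have h2 : pvSeq nums ((μ + (m - μ) % lam) + ((m - μ) / lam) * lam)
        = pvSeq nums (μ + (m - μ) % lam) := pvMulti hlam _ _ (by omega)
    have e : (μ + (m - μ) % lam) + ((m - μ) / lam) * lam = m := by
      have h4 := Nat.mod_add_div (m - μ) lam
      have h5 : ((m - μ) / lam) * lam = lam * ((m - μ) / lam) := Nat.mul_comm _ _
      omega
    rw [e] at h2
    exact h2.symm
  have hE2 : pvSeq nums ((μ + (m - μ) % lam) + r) = pvSeq nums (μ + (m - μ) % lam) := by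
    have t1 := pvSeq_shift hE r
    rw [hper] at t1
    rw [← hE] at t1
    exact t1
  have hs' : (m - μ) % lam < lam := Nat.mod_lt _ hlam0
  have t2 := pvSeq_shift hE2 (lam - (m - μ) % lam)
  have e1 : (μ + (m - μ) % lam + r) + (lam - (m - μ) % lam) = (μ + r) + lam := by omega
  have e2 : (μ + (m - μ) % lam) + (lam - (m - μ) % lam) = μ + lam := by omega
  rw [e1, e2, hlam] at t2
  have t3 : pvSeq nums ((μ + r) + lam) = pvSeq nums (μ + r) := pvPer1 hlam _ (by omega)
  have t4 : pvSeq nums (μ + r) = pvSeq nums μ := by rw [← t3, t2]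
  exact absurd (hlammin r hr0 t4) (by omega)

theorem pvPeriodDvd {nums : List Int} {μ lam : Nat}
    (hlam : pvSeq nums (μ + lam) = pvSeq nums μ) (hlam0 : 0 < lam)
    (hlammin : ∀ p, 0 < p → pvSeq nums (μ + p) = pvSeq nums μ → lam ≤ p) :
    ∀ m p, μ ≤ m → 0 < p → pvSeq nums (m + p) = pvSeq nums m → lam ∣ p := by
  intro m p hm hp0 hper
  rcases Nat.eq_zero_or_pos (p % lam) with h0 | hpos
  · exact Nat.dvd_of_mod_eq_zero h0
  · exfalso
    have h2 : pvSeq nums (m + p % lam) = pvSeq nums m := by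
      have h3 : pvSeq nums ((m + p % lam) + (p / lam) * lam) = pvSeq nums (m + p % lam) :=
        pvMulti hlam _ _ (by omega)
      have e : (m + p % lam) + (p / lam) * lam = m + p := by
        have h4 := Nat.mod_add_div p lam
        have h5 : (p / lam) * lam = lam * (p / lam) := Nat.mul_comm _ _
        omega
      rw [e, hper] at h3
      exact h3.symm
    exact pvNoSmallPeriod hlam hlam0 hlammin m (p % lam) hm hpos (Nat.mod_lt _ hlam0) h2

theorem pvDistinct {nums : List Int} {μ lam : Nat}
    (hμmin : ∀ m p, 0 < p → pvSeq nums (m + p) = pvSeq nums m → μ ≤ m)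
    (hlam : pvSeq nums (μ + lam) = pvSeq nums μ) (hlam0 : 0 < lam)
    (hlammin : ∀ p, 0 < p → pvSeq nums (μ + p) = pvSeq nums μ → lam ≤ p) :
    ∀ i j, i < j → j < μ + lam → pvSeq nums i ≠ pvSeq nums j := by
  intro i j hij hjM heq
  have hper : pvSeq nums (i + (j - i)) = pvSeq nums i := by
    have e : i + (j - i) = j := by omega
    rw [e]
    exact heq.symm
  have hμi : μ ≤ i := hμmin i (j - i) (by omega) hper
  exact pvNoSmallPeriod hlam hlam0 hlammin i (j - i) hμi (by omega) (by omega) hper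

theorem pvPhase1_term {nums : List Int} (h1 : 1 ≤ nums.length)
    (hb : ∀ x ∈ nums, -(nums.length : Int) ≤ x ∧ x < (nums.length : Int)) :
    ∀ (f a k : Nat), a < k → k ≤ a + f → pvSeq nums k = pvSeq nums (2*k) →
    ∃ r, pvPhase1 nums f (pvSeq nums a) (pvSeq nums (2*a)) = some r := by
  intro f
  induction f with
  | zero => intro a k ha hk _; omega
  | succ f ih =>
      intro a k hak hkf hmeet
      have l1 := pvSeq_lookup h1 hb a
      have l2 := pvSeq_lookup h1 hb (2*a)
      have l3 := pvSeq_lookup h1 hb (2*a+1)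
      rw [pvPhase1, l1, l2]
      simp only [Option.bind_some, l3]
      by_cases he : pvSeq nums (a+1) = pvSeq nums (2*a+1+1)
      · rw [if_pos he]; exact ⟨_, rfl⟩
      · rw [if_neg he]
        have hka : k ≠ a + 1 := by
          intro hk
          apply he
          have e : 2*a+1+1 = 2*(a+1) := by omega
          rw [e, ← hk]; exact hmeet
        have e : 2*a+1+1 = 2*(a+1) := by omega
        rw [e]
        exact ih (a+1) k (by omega) (by omega) hmeet

theorem pvPhase1_sound {nums : List Int} (h1 : 1 ≤ nums.length)
    (hb : ∀ x ∈ nums, -(nums.length : Int) ≤ x ∧ x < (nums.length : Int)) :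
    ∀ (f a : Nat) (r : Int), pvPhase1 nums f (pvSeq nums a) (pvSeq nums (2*a)) = some r →
    ∃ k, a < k ∧ pvSeq nums k = pvSeq nums (2*k) ∧ r = pvSeq nums k ∧
      ∀ m, a < m → m < k → pvSeq nums m ≠ pvSeq nums (2*m) := by
  intro f
  induction f with
  | zero => intro a r h; simp [pvPhase1] at h
  | succ f ih =>
      intro a r h
      have l1 := pvSeq_lookup h1 hb a
      have l2 := pvSeq_lookup h1 hb (2*a)
      have l3 := pvSeq_lookup h1 hb (2*a+1)
      rw [pvPhase1, l1, l2] at h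
      simp only [Option.bind_some, l3] at h
      by_cases he : pvSeq nums (a+1) = pvSeq nums (2*a+1+1)
      · rw [if_pos he] at h
        refine ⟨a+1, by omega, ?_, by simpa using h.symm, by omega⟩
        have e : 2*a+1+1 = 2*(a+1) := by omega
        rw [← e]; exact he
      · rw [if_neg he] at h
        have e : 2*a+1+1 = 2*(a+1) := by omega
        rw [e] at h
        obtain ⟨k, hk1, hk2, hk3, hk4⟩ := ih (a+1) r h
        refine ⟨k, by omega, hk2, hk3, ?_⟩
        intro m hm1 hm2
        rcases Nat.eq_or_lt_of_le hm1 with hm | hm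
        · intro hc; apply he
          have e2 : 2*a+1+1 = 2*(a+1) := by omega
          have hm' : m = a + 1 := by omega
          rw [e2, ← hm']; exact hc
        · exact hk4 m (by omega) hm2

theorem pvPhase2_term {nums : List Int} (h1 : 1 ≤ nums.length)
    (hb : ∀ x ∈ nums, -(nums.length : Int) ≤ x ∧ x < (nums.length : Int)) {K : Nat}
    (hKper : ∀ m, K ≤ m → pvSeq nums (m + K) = pvSeq nums m) :
    ∀ (f j : Nat), j ≤ K → K < j + f →
    ∃ r, pvPhase2 nums f (pvSeq nums j) (pvSeq nums (j + K)) = some r := by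
  intro f
  induction f with
  | zero => intro j hj hK; omega
  | succ f ih =>
      intro j hjK hKf
      rw [pvPhase2]
      by_cases he : pvSeq nums j = pvSeq nums (j + K)
      · rw [if_pos he]; exact ⟨_, rfl⟩
      · rw [if_neg he]
        have hjK' : j ≠ K := by
          intro hj
          apply he
          rw [hj]
          exact (hKper K (le_refl K)).symm
        rw [pvSeq_lookup h1 hb j, pvSeq_lookup h1 hb (j + K)]
        have e : j + K + 1 = (j+1) + K := by omega
        rw [e]
        exact ih (j+1) (by omega) (by omega)

theorem pvPhase2_sound {nums : List Int} (h1 : 1 ≤ nums.length)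
    (hb : ∀ x ∈ nums, -(nums.length : Int) ≤ x ∧ x < (nums.length : Int)) {K : Nat} :
    ∀ (f j : Nat) (r : Int), pvPhase2 nums f (pvSeq nums j) (pvSeq nums (j + K)) = some r →
    ∃ j0, j ≤ j0 ∧ pvSeq nums j0 = pvSeq nums (j0 + K) ∧ r = pvSeq nums j0 ∧
      ∀ m, j ≤ m → m < j0 → pvSeq nums m ≠ pvSeq nums (m + K) := by
  intro f
  induction f with
  | zero => intro j r h; simp [pvPhase2] at h
  | succ f ih =>
      intro j r h
      rw [pvPhase2] at h
      by_cases he : pvSeq nums j = pvSeq nums (j + K)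
      · rw [if_pos he] at h
        exact ⟨j, le_refl j, he, by simpa using h.symm, by omega⟩
      · rw [if_neg he] at h
        rw [pvSeq_lookup h1 hb j, pvSeq_lookup h1 hb (j + K)] at h
        have e : j + K + 1 = (j+1) + K := by omega
        rw [e] at h
        obtain ⟨j0, hj1, hj2, hj3, hj4⟩ := ih (j+1) r h
        refine ⟨j0, by omega, hj2, hj3, ?_⟩
        intro m hm1 hm2
        rcases Nat.eq_or_lt_of_le hm1 with hm | hm
        · rw [← hm]; exact he
        · exact hj4 m (by omega) hm2

theorem pvWalk_spec {nums : List Int} (h1 : 1 ≤ nums.length)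
    (hb : ∀ x ∈ nums, -(nums.length : Int) ≤ x ∧ x < (nums.length : Int)) {μ lam : Nat}
    (hlam : pvSeq nums (μ + lam) = pvSeq nums μ) (hlam0 : 0 < lam)
    (hdist : ∀ i j, i < j → j < μ + lam → pvSeq nums i ≠ pvSeq nums j) :
    ∀ (f m : Nat) (seen : PySem.Set Int), m ≤ μ + lam → μ + lam < m + f →
    (∀ y, y ∈ seen ↔ ∃ i, i < m ∧ pvSeq nums i = y) →
    pvWalk nums f seen (pvSeq nums m) = some (pvSeq nums μ) := by
  intro f
  induction f with
  | zero => intro m seen hm hf _; omega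
  | succ f ih =>
      intro m seen hm hf hinv
      rw [pvWalk]
      by_cases hMm : m = μ + lam
      · have hmem : pvSeq nums m ∈ seen := by
          rw [hinv]
          exact ⟨μ, by omega, by rw [hMm]; exact hlam.symm⟩
        rw [if_pos (by simpa [PySem.Set.contains] using hmem)]
        rw [hMm, hlam]
      · have hmM : m < μ + lam := by omega
        have hnmem : pvSeq nums m ∉ seen := by
          rw [hinv]
          rintro ⟨i, hi, hieq⟩
          exact hdist i m hi hmM hieq
        rw [if_neg (by simpa [PySem.Set.contains] using hnmem)]
        rw [pvSeq_lookup h1 hb m]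
        apply ih (m+1) _ (by omega) (by omega)
        intro y
        rw [PySem.Set.mem_add]
        rw [hinv]
        constructor
        · rintro (⟨i, hi, hieq⟩ | hy)
          · exact ⟨i, by omega, hieq⟩
          · exact ⟨m, by omega, hy.symm⟩
        · rintro ⟨i, hi, hieq⟩
          rcases Nat.lt_or_ge i m with h | h
          · exact Or.inl ⟨i, h, hieq⟩
          · have : i = m := by omega
            exact Or.inr (by rw [← hieq, this])

theorem pvMain {nums : List Int} (hpre : Pre_findDuplicate_floyd nums) :
    findDuplicate_floyd nums = findDuplicate_floyd_alt nums := by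
  obtain ⟨h1, hb⟩ := hpre
  -- nums[0]
  have hx0 : PySem.List.pyGet? nums 0 = some (pvSeq nums 0) :=
    (pvG_spec (by omega) (by exact_mod_cast by omega)).1
  -- an eventual repeat of the orbit
  obtain ⟨i, j, hij, hj2, hrep⟩ := pvSeq_repeat h1 hb
  -- μ: the least index with a future repeat;  lam: the least period at μ
  have hji : pvSeq nums (i + (j - i)) = pvSeq nums i := by
    have e : i + (j - i) = j := by omega
    rw [e]; exact hrep.symm
  have hk1 : i + 1 ≤ (j - i) * (i + 1) := Nat.le_mul_of_pos_left _ (by omega)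
  have hPex : ∃ m, ∃ p, 0 < p ∧ pvSeq nums (m + p) = pvSeq nums m :=
    ⟨i, j - i, by omega, hji⟩
  letI : DecidablePred (fun m => ∃ p, 0 < p ∧ pvSeq nums (m + p) = pvSeq nums m) :=
    fun _ => Classical.dec _
  set μ := Nat.find hPex with hμdef
  have hμP : ∃ p, 0 < p ∧ pvSeq nums (μ + p) = pvSeq nums μ := Nat.find_spec hPex
  have hμmin : ∀ m p, 0 < p → pvSeq nums (m + p) = pvSeq nums m → μ ≤ m :=
    fun m p hp hper => Nat.find_min' hPex ⟨p, hp, hper⟩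
  letI : DecidablePred (fun p => 0 < p ∧ pvSeq nums (μ + p) = pvSeq nums μ) :=
    fun _ => Classical.dec _
  set lam := Nat.find hμP with hlamdef
  obtain ⟨hlam0, hlam⟩ : 0 < lam ∧ pvSeq nums (μ + lam) = pvSeq nums μ := Nat.find_spec hμP
  have hlammin : ∀ p, 0 < p → pvSeq nums (μ + p) = pvSeq nums μ → lam ≤ p :=
    fun p hp hper => Nat.find_min' hμP ⟨hp, hper⟩
  have hdist := pvDistinct hμmin hlam hlam0 hlammin
  -- μ + lam ≤ 2 * len  (the first μ+lam orbit values are pairwise distinct)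
  have hM2 : μ + lam ≤ 2 * nums.length := by
    have hinj : Set.InjOn (fun m => pvSeq nums m) ↑(Finset.range (μ + lam)) := by
      intro a ha b hb' hab
      simp only [Finset.coe_range, Set.mem_Iio] at ha hb'
      rcases lt_trichotomy a b with h | h | h
      · exact absurd hab (hdist a b h hb')
      · exact h
      · exact absurd hab.symm (hdist b a h ha)
    have hmaps : ∀ a ∈ Finset.range (μ + lam),
        pvSeq nums a ∈ Finset.Icc (-(nums.length : Int)) ((nums.length : Int) - 1) := by
      intro a _
      have := pvSeq_bounds h1 hb a
      rw [Finset.mem_Icc]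
      omega
    have hcc := Finset.card_le_card_of_injOn _ hmaps hinj
    rw [Finset.card_range, Int.card_Icc] at hcc
    omega
  -- ===== A's value is pvSeq μ =====
  -- phase 1 terminates: there is a meeting point k* = (j-i)*(i+1)
  have hkstar : pvSeq nums ((j-i)*(i+1)) = pvSeq nums (2*((j-i)*(i+1))) := by
    have h5 := pvMulti hji (i+1) ((j-i)*(i+1)) (by omega)
    have e : (j-i)*(i+1) + (i+1)*(j-i) = 2*((j-i)*(i+1)) := by ring
    rw [e] at h5
    exact h5.symm
  have hkbound : (j-i)*(i+1) ≤ 4 * nums.length * nums.length := by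
    have hji : j - i ≤ 2 * nums.length := by omega
    have hi1 : i + 1 ≤ 2 * nums.length := by omega
    calc (j-i)*(i+1) ≤ (2*nums.length) * (2*nums.length) := Nat.mul_le_mul hji hi1
      _ = 4 * nums.length * nums.length := by ring
  obtain ⟨meet, hmeet⟩ := pvPhase1_term h1 hb (4 * nums.length * nums.length + 2) 0
    ((j-i)*(i+1)) (by omega) (by omega) hkstar
  have hmeet0 : pvPhase1 nums (4 * nums.length * nums.length + 2)
      (pvSeq nums 0) (pvSeq nums 0) = some meet := by
    have e : pvSeq nums (2*0) = pvSeq nums 0 := by norm_num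
    rw [← e]; exact hmeet
  obtain ⟨K, hK0, hKmeet, hmeetK, hKmin⟩ := pvPhase1_sound h1 hb _ 0 meet hmeet
  have hKk : K ≤ (j-i)*(i+1) := by
    by_contra hc
    exact hKmin _ (by omega) (by omega) hkstar
  have hKKper : ∀ m, K ≤ m → pvSeq nums (m + K) = pvSeq nums m := by
    intro m hm
    have hKK : pvSeq nums (K + K) = pvSeq nums K := by
      have e : K + K = 2 * K := by omega
      rw [e]; exact hKmeet.symm
    exact pvPer1 hKK m hm
  obtain ⟨r, hr⟩ := pvPhase2_term h1 hb hKKper (4 * nums.length * nums.length + 2) 0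
    (by omega) (by omega)
  obtain ⟨j0, -, hj0meet, hrj0, hj0min⟩ := pvPhase2_sound (K := K) h1 hb _ 0 r hr
  have hr0 : pvPhase2 nums (4 * nums.length * nums.length + 2) (pvSeq nums 0) meet = some r := by
    rw [hmeetK]
    have e : pvSeq nums K = pvSeq nums (0 + K) := by norm_num
    rw [e]; exact hr
  have hAval : findDuplicate_floyd nums = r := by
    simp only [findDuplicate_floyd, hx0, hmeet0, hr0, Option.getD_some]
  -- j0 = μ
  have hμK : μ ≤ K := hμmin K K hK0 (hKKper K (le_refl K))
  have hdvd : lam ∣ K := pvPeriodDvd hlam hlam0 hlammin K K hμK hK0 (hKKper K (le_refl K))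
  have hμKper : pvSeq nums (μ + K) = pvSeq nums μ := by
    have h5 := pvMulti hlam (K / lam) μ (le_refl μ)
    have e : (K / lam) * lam = K := Nat.div_mul_cancel hdvd
    rw [e] at h5
    exact h5
  have hj0μ : j0 = μ := by
    have hle : j0 ≤ μ := by
      by_contra hc
      exact hj0min μ (by omega) (by omega) hμKper.symm
    have hge : μ ≤ j0 := hμmin j0 K hK0 hj0meet.symm
    omega
  -- ===== B's value is pvSeq μ =====
  have hBwalk := pvWalk_spec h1 hb hlam hlam0 hdist (2 * nums.length + 2) 0 PySem.Set.empty
    (by omega) (by omega) (by intro y; simp [PySem.Set.empty])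
  have hBval : findDuplicate_floyd_alt nums = pvSeq nums μ := by
    simp only [findDuplicate_floyd_alt, hx0, hBwalk, Option.getD_some]
  rw [hAval, hrj0, hj0μ, hBval]

-- ===== VERDICT (by name: the statement is the Claim_ definition above) =====
theorem findDuplicate_floyd_spec : Claim_equal_findDuplicate_floyd := by
  intro nums _ hpre
  unfold Spec_findDuplicate_floyd
  exact pvMain hpre
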